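-- pv_equiv track=rewrite | github.com/Patato777/AoC-2020 | scripts/AoC2020-18_2.py | add_par
-- ===== SOURCE A (Python) =====
-- def add_par(expr) :
--     par = [0]
--     yield '('
--     for char in expr :
--         yield char
--         if char == '(' :
--             par = [k+1 for k in par]
--         elif char == ')' :
--             par = [k-1 for k in par]
--         elif char == '*' :
--             yield '('
--             par.append(0)
--             par = [k+1 for k in par]
--         while par and par[-1] == 0 :
--             yield ')'
--             par.pop()
--             par = [k-1 for k in par]
--     for _ in par :
--         yield ')'
-- ===== SOURCE B (Python) =====
-- def add_par(expr):
--     # Two passes: pass 1 annotates each character with the parens to insert,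
--     # using a counter stack updated only at its top (transfer-on-pop) instead
--     # of A's rewrite of the whole counter list on every character; pass 2
--     # renders the output from the annotations.
--     ann = []            # (char, open_paren_after, closers_after)
--     st = [0]
--     for ch in expr:
--         if ch == '(':
--             if st:
--                 st[-1] += 1
--         elif ch == ')':
--             if st:
--                 st[-1] -= 1
--         star = ch == '*'
--         if star:
--             st.append(1)
--         k = 0
--         while st and st[-1] == 0:
--             k += 1
--             st.pop()
--             if st:
--                 st[-1] -= 1
--         ann.append((ch, star, k))
--     yield '('
--     for ch, star, k in ann:
--         yield ch
--         if star:
--             yield '('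
--         yield from ')' * k
--     yield from ')' * len(st)
-- ===== Notes on version B (the rewrite author's own statement) =====
-- stated objective: alternative
-- what changed: B works in two passes: pass 1 annotates each character with the parentheses to insert, using a counter stack updated only at its top (a -1 is transferred to the entry below on each pop) instead of A's rewrite of the whole counter list on every character; pass 2 renders the output from the annotations.
import Mathlib
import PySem

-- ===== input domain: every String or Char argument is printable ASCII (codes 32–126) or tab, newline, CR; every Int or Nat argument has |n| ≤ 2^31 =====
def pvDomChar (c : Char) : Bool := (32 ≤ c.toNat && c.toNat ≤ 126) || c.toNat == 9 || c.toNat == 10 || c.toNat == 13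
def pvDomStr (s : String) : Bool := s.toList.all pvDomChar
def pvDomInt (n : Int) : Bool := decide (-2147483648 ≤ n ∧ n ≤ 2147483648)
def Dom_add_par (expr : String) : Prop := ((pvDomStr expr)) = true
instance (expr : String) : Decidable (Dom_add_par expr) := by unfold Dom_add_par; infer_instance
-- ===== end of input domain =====

-- B annotates each character in a first pass (counter stack with top-only updates,
-- transfer on pop) and renders the output in a second pass, instead of A's
-- emit-as-you-go rewrite of the whole counter list on every character.

-- ===== PORT A =====
-- the inner 'while par and par[-1] == 0' loop of A
def aWhile (par : List Int) (out : List String) : List Int × List String :=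
  if h : par.getLast? = some 0 then
    aWhile ((par.dropLast).map (· - 1)) (out ++ [")"])
  else (par, out)
termination_by par.length
decreasing_by
  have hne : par ≠ [] := by intro he; simp [he] at h
  simp [List.length_dropLast]
  exact List.length_pos_iff.mpr hne

-- one iteration of A's 'for char in expr' body
def aStep (s : List Int × List String) (c : Char) : List Int × List String :=
  let out := s.2 ++ [String.ofList [c]]
  let pr :=
    if c = '(' then (s.1.map (· + 1), out)
    else if c = ')' then (s.1.map (· - 1), out)
    else if c = '*' then ((s.1 ++ [0]).map (· + 1), out ++ ["("])
    else (s.1, out)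
  aWhile pr.1 pr.2

def add_par (expr : String) : List String :=
  let s := expr.toList.foldl aStep ([0], ["("])
  s.2 ++ s.1.map (fun _ => ")")

-- ===== PORT B =====
-- Python's 'if st: st[-1] += d' (adjust the top of the stack, if any)
def bAdj (st : List Int) (d : Int) : List Int :=
  match st.getLast? with
  | none => st
  | some t => st.dropLast ++ [t + d]

-- bAdj keeps the stack length (needed for bPop's termination)
lemma bAdj_length (st : List Int) (d : Int) : (bAdj st d).length = st.length := by
  unfold bAdj
  cases h : st.getLast? with
  | none => rfl
  | some t =>
    have hne : st ≠ [] := by intro he; simp [he] at h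
    have hp : 0 < st.length := List.length_pos_iff.mpr hne
    simp [List.length_dropLast]
    omega

-- B's 'while st and st[-1] == 0' loop: pop zero tops, transferring a -1 to the
-- entry below on each pop; returns the new stack and the number of pops
def bPop (st : List Int) : List Int × Nat :=
  if h : st.getLast? = some 0 then
    let r := bPop (bAdj st.dropLast (-1))
    (r.1, r.2 + 1)
  else (st, 0)
termination_by st.length
decreasing_by
  have hne : st ≠ [] := by intro he; simp [he] at h
  rw [bAdj_length]
  have : 0 < st.length := List.length_pos_iff.mpr hne
  simp [List.length_dropLast]
  omega

-- pass 1, one character: update the stack and record the annotation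
def bStep (s : List Int × List (Char × Bool × Nat)) (c : Char) :
    List Int × List (Char × Bool × Nat) :=
  let st1 := if c = '(' then bAdj s.1 1 else if c = ')' then bAdj s.1 (-1) else s.1
  let star : Bool := c == '*'
  let st2 := if star then st1 ++ [1] else st1
  let pr := bPop st2
  (pr.1, s.2 ++ [(c, star, pr.2)])

-- pass 2: what one annotation contributes to the output
def bRender (a : Char × Bool × Nat) : List String :=
  String.ofList [a.1] :: ((if a.2.1 then ["("] else []) ++ List.replicate a.2.2 ")")

def add_par_alt (expr : String) : List String :=
  let s := expr.toList.foldl bStep ([0], [])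
  "(" :: (s.2.flatMap bRender ++ List.replicate s.1.length ")")

-- ===== PRECONDITION & SPEC =====
def Spec_add_par (expr : String) (out : List String) : Prop := out = add_par_alt expr
instance (expr : String) (out : List String) : Decidable (Spec_add_par expr out) := by unfold Spec_add_par; infer_instance

-- ===== CLAIM (what is proved, stated in full; the proofs are below) =====
def Claim_equal_add_par : Prop := ∀ (expr : String), Dom_add_par expr → Spec_add_par expr (add_par expr)

-- ===== LEMMAS AND PROOFS =====

-- the invariant: A's counter list is the list of suffix sums of B's stack
def susu : List Int → List Int
  | [] => []
  | a :: t => (a + t.sum) :: susu t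

lemma susu_length (st : List Int) : (susu st).length = st.length := by
  induction st with
  | nil => rfl
  | cons a t ih => simp [susu, ih]


lemma susu_append_singleton (q : List Int) (x : Int) :
    susu (q ++ [x]) = (susu q).map (· + x) ++ [x] := by
  induction q with
  | nil => simp [susu]
  | cons a t ih => simp [susu, ih]; ring

lemma susu_getLast? (st : List Int) : (susu st).getLast? = st.getLast? := by
  rcases List.eq_nil_or_concat st with rfl | ⟨q, x, rfl⟩
  · rfl
  · simp only [List.concat_eq_append]
    rw [susu_append_singleton]
    simp

lemma susu_adj (st : List Int) (d : Int) :
    susu (bAdj st d) = (susu st).map (· + d) := by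
  rcases List.eq_nil_or_concat st with rfl | ⟨q, x, rfl⟩
  · rfl
  · simp only [List.concat_eq_append]
    have hg : (q ++ [x]).getLast? = some x := by simp
    unfold bAdj
    rw [hg]
    simp only [List.dropLast_concat]
    rw [susu_append_singleton, susu_append_singleton, List.map_append, List.map_map]
    congr 1
    · apply List.map_congr_left; intro a _; simp; ring


lemma while_rel (st : List Int) (out : List String) :
    aWhile (susu st) out = (susu (bPop st).1, out ++ List.replicate (bPop st).2 ")") := by
  induction hn : st.length using Nat.strong_induction_on generalizing st out with
  | _ n ih =>
    subst hn
    rcases List.eq_nil_or_concat st with rfl | ⟨q, x, hq⟩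
    · rw [aWhile, bPop]
      simp [susu]
    · simp only [List.concat_eq_append] at hq
      subst hq
      rw [aWhile, bPop]
      by_cases hx : x = 0
      · subst hx
        have hA : (susu (q ++ [(0:Int)])).getLast? = some 0 := by
          rw [susu_getLast?]; simp
        have hB : (q ++ [(0:Int)]).getLast? = some 0 := by simp
        rw [dif_pos hA, dif_pos hB]
        have hdrop : ((susu (q ++ [(0:Int)])).dropLast).map (· - 1)
            = susu (bAdj (q ++ [(0:Int)]).dropLast (-1)) := by
          rw [susu_append_singleton, susu_adj]
          simp only [List.dropLast_concat, List.map_map]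
          apply List.map_congr_left; intro a _; simp; omega
        rw [hdrop]
        rw [ih (bAdj (q ++ [(0:Int)]).dropLast (-1)).length
              (by rw [bAdj_length]; simp) _ (out ++ [")"]) rfl]
        rw [List.replicate_succ]
        simp
      · have hA : ¬ (susu (q ++ [x])).getLast? = some 0 := by
          rw [susu_getLast?]; simp [hx]
        have hB : ¬ (q ++ [x]).getLast? = some 0 := by simp [hx]
        rw [dif_neg hA, dif_neg hB]
        simp

lemma step_rel (st : List Int) (out : List String) (c : Char) :
    aStep (susu st, out) c =
      (susu ((bStep (st, []) c).1), out ++ ((bStep (st, []) c).2).flatMap bRender) := by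
  by_cases h1 : c = '('
  · subst h1
    simp only [aStep, bStep, Char.reduceEq, Char.reduceBEq, reduceIte, reduceCtorEq]
    rw [← susu_adj, while_rel]
    simp [bRender]
  · by_cases h2 : c = ')'
    · subst h2
      simp only [aStep, bStep, Char.reduceEq, Char.reduceBEq, reduceIte, reduceCtorEq]
      simp only [sub_eq_add_neg]
      rw [← susu_adj, while_rel]
      simp [bRender]
    · by_cases h3 : c = '*'
      · subst h3
        simp only [aStep, bStep, Char.reduceEq, Char.reduceBEq, reduceIte]
        have hpush : ((susu st) ++ [(0:Int)]).map (· + 1) = susu (st ++ [1]) := by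
          rw [susu_append_singleton]
          simp
        rw [hpush, while_rel]
        simp [bRender]
      · simp only [aStep, bStep, if_neg h1, if_neg h2, if_neg h3]
        have hstar : (c == '*') = false := by simp [h3]
        rw [hstar]
        simp only [Bool.false_eq_true, if_neg (by simp : ¬False)]
        rw [while_rel]
        simp [bRender]

lemma fold_ann (cs : List Char) (st : List Int) (ann : List (Char × Bool × Nat)) :
    cs.foldl bStep (st, ann) =
      ((cs.foldl bStep (st, [])).1, ann ++ (cs.foldl bStep (st, [])).2) := by
  induction cs generalizing st ann with
  | nil => simp
  | cons c cs ih =>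
    simp only [List.foldl_cons]
    rcases hp : bStep (st, []) c with ⟨s1, r1⟩
    have hb : bStep (st, ann) c = (s1, ann ++ r1) := by
      have : bStep (st, ann) c = ((bStep (st, []) c).1, ann ++ (bStep (st, []) c).2) := by
        simp [bStep]
      rw [this, hp]
    rw [hb, ih s1 (ann ++ r1), ih s1 r1]
    simp

lemma fold_rel (cs : List Char) (st : List Int) (out : List String) :
    cs.foldl aStep (susu st, out) =
      (susu ((cs.foldl bStep (st, [])).1),
        out ++ ((cs.foldl bStep (st, [])).2).flatMap bRender) := by
  induction cs generalizing st out with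
  | nil => simp
  | cons c cs ih =>
    simp only [List.foldl_cons]
    rw [step_rel]
    rcases hp : bStep (st, []) c with ⟨s1, r1⟩
    rw [ih s1, fold_ann cs s1 r1]
    simp [List.flatMap_append, List.append_assoc]


-- ===== VERDICT (by name: the statement is the Claim_ definition above) =====
theorem add_par_spec : Claim_equal_add_par := by
  intro expr _
  unfold Spec_add_par add_par add_par_alt
  have h := fold_rel expr.toList [0] ["("]
  have h0 : susu [0] = [0] := rfl
  rw [h0] at h
  simp only [h]
  rw [List.map_const', susu_length]
  simp
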